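-- pv_equiv track=rewrite | github.com/Arsen1302/Code-copy-detector | TestData/solutions/problem_1018_3.py | solution_1018_3
-- ===== SOURCE A (Python) =====
-- def solution_1018_3(s: str) -> int:
--     cnt, ans = 0, 0
--     for i in range(len(s)):
--         if s[i] == '0':
--             cnt = 0
--         else:
--             cnt += 1
--             ans += cnt
--     return ans % ((10**9)+7)
-- ===== SOURCE B (Python) =====
-- def solution_1018_3(s: str) -> int:
--     total = 0
--     for part in s.split('0'):
--         L = len(part)
--         total += L * (L + 1) // 2
--     return total % ((10**9) + 7)
-- ===== Notes on version B (the rewrite author's own statement) =====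
-- stated objective: faster
-- what changed: B splits the string at the zero character into maximal zero-free runs and sums the closed form L*(L+1)//2 per run, replacing A's per-character running counter added into the answer at every position (same O(n), but the work moves into C-level str.split).
import Mathlib
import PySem

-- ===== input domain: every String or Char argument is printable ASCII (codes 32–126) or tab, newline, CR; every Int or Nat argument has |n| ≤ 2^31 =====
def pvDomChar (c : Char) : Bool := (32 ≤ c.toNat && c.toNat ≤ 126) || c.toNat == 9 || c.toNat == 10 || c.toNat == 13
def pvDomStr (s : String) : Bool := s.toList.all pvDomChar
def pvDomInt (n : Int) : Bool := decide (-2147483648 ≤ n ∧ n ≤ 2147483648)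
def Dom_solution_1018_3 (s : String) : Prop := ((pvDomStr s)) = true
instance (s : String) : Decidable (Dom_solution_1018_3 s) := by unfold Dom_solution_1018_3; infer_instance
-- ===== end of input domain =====

-- B replaces A's per-character running counter by split-on-'0' segments summed with the closed form L*(L+1)//2 (alternative decomposition, same cost).

-- ===== PORT A =====
-- per-character loop: cnt resets on '0', otherwise cnt += 1; ans += cnt; finally ans % (10^9+7)
def solution_1018_3 (s : String) : Int :=
  PySem.Int.mod
    (s.toList.foldl
      (fun (st : Int × Int) c =>
        if c = '0' then (0, st.2) else (st.1 + 1, st.2 + (st.1 + 1)))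
      (0, 0)).2
    ((10 ^ 9) + 7)

-- ===== PORT B =====
-- s.split('0'), then total += L * (L + 1) // 2 per part; finally total % (10^9+7)
def solution_1018_3_alt (s : String) : Int :=
  PySem.Int.mod
    ((PySem.Chars.splitOn s.toList ['0']).foldl
      (fun (acc : Int) part =>
        acc + PySem.Int.floordiv ((part.length : Int) * ((part.length : Int) + 1)) 2)
      0)
    ((10 ^ 9) + 7)

-- ===== PRECONDITION & SPEC =====
def Spec_solution_1018_3 (s : String) (out : Int) : Prop := out = solution_1018_3_alt s
instance (s : String) (out : Int) : Decidable (Spec_solution_1018_3 s out) := by unfold Spec_solution_1018_3; infer_instance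

-- ===== CLAIM (what is proved, stated in full; the proofs are below) =====
def Claim_equal_solution_1018_3 : Prop := ∀ (s : String), Dom_solution_1018_3 s → Spec_solution_1018_3 s (solution_1018_3 s)

-- ===== LEMMAS AND PROOFS =====

-- simple recursive splitter on '0' carrying the current segment
def pvSplitAux : List Char → List Char → List (List Char)
  | pre, [] => [pre]
  | pre, c :: r => if c = '0' then pre :: pvSplitAux [] r else pvSplitAux (pre ++ [c]) r

-- the amount A's loop adds to ans over l when the counter starts at cnt
def pvS : List Char → Int → Int
  | [], _ => 0
  | c :: r, cnt => if c = '0' then pvS r 0 else (cnt + 1) + pvS r (cnt + 1)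

theorem pv_go_eq (fuel : Nat) : ∀ (l cur : List Char) (acc : List (List Char)),
    l.length ≤ fuel →
    PySem.Chars.splitOn.go ['0'] fuel l cur acc = acc.reverse ++ pvSplitAux cur.reverse l := by
  induction fuel with
  | zero =>
    intro l cur acc h
    have : l = [] := by cases l <;> simp_all
    subst this
    rw [PySem.Chars.splitOn.go.eq_def]
    simp [pvSplitAux]
  | succ fuel ih =>
    intro l cur acc h
    cases l with
    | nil =>
      rw [PySem.Chars.splitOn.go.eq_def]
      simp [pvSplitAux]
    | cons c rest =>
      rw [PySem.Chars.splitOn.go.eq_def]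
      by_cases hc : c = '0'
      · have hg : List.isPrefixOf ['0'] (c :: rest) = true := by simp [List.isPrefixOf, hc]
        simp only [hg, if_true]
        rw [show List.drop (['0'].length) (c :: rest) = rest from rfl]
        rw [ih rest [] (cur.reverse :: acc) (by simpa using Nat.le_of_succ_le_succ h)]
        simp [pvSplitAux, hc]
      · have hg : List.isPrefixOf ['0'] (c :: rest) = false := by
          simp only [List.isPrefixOf, Bool.and_true, beq_eq_false_iff_ne]
          exact fun h' => hc h'.symm
        simp only [hg, Bool.false_eq_true, if_false]
        rw [ih rest (c :: cur) acc (by simpa using Nat.le_of_succ_le_succ h)]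
        simp [pvSplitAux, hc]

theorem pv_splitOn_eq (l : List Char) :
    PySem.Chars.splitOn l ['0'] = pvSplitAux [] l := by
  have := pv_go_eq (l.length + 1) l [] [] (by omega)
  simpa [PySem.Chars.splitOn] using this

theorem pv_foldA (l : List Char) : ∀ (cnt ans : Int),
    (l.foldl (fun (st : Int × Int) c =>
      if c = '0' then (0, st.2) else (st.1 + 1, st.2 + (st.1 + 1))) (cnt, ans)).2
    = ans + pvS l cnt := by
  induction l with
  | nil => intro cnt ans; simp [pvS]
  | cons c r ih =>
    intro cnt ans
    by_cases hc : c = '0'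
    · simp [hc, pvS, ih]
    · simp [hc, pvS, ih]; ring

theorem pv_tri_succ (n : Nat) :
    ((n + 1) * (n + 1 + 1) / 2 : Nat) = (n * (n + 1) / 2 : Nat) + (n + 1) := by
  have h : (n + 1) * (n + 1 + 1) = n * (n + 1) + (n + 1) * 2 := by ring
  rw [h, Nat.add_mul_div_right _ _ (by norm_num)]

theorem pv_foldB (l : List Char) : ∀ (pre : List Char) (acc : Int),
    ((pvSplitAux pre l).foldl
      (fun (acc : Int) part =>
        acc + PySem.Int.floordiv ((part.length : Int) * ((part.length : Int) + 1)) 2)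
      acc)
    = acc + ((pre.length * (pre.length + 1) / 2 : Nat) : Int) + pvS l (pre.length : Int) := by
  induction l with
  | nil => intro pre acc; simp [pvSplitAux, pvS]
  | cons c r ih =>
    intro pre acc
    by_cases hc : c = '0'
    · simp only [pvSplitAux, hc, if_true, List.foldl_cons, pvS]
      rw [ih []]
      simp
    · simp only [pvSplitAux, hc, if_false, pvS]
      rw [ih (pre ++ [c])]
      simp [List.length_append, pv_tri_succ]
      ring

-- ===== VERDICT (by name: the statement is the Claim_ definition above) =====
theorem solution_1018_3_spec : Claim_equal_solution_1018_3 := by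
  intro s _
  unfold Spec_solution_1018_3 solution_1018_3 solution_1018_3_alt
  rw [pv_splitOn_eq, pv_foldA s.toList 0 0, pv_foldB s.toList [] 0]
  simp
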